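-- pv_equiv track=rewrite | github.com/juanu1293/Mochila-binaria | Mochila Binaria/euristicas.py | tabu_search
-- ===== SOURCE A (Python) =====
-- def valor_y_volumen_por_X(X, C, V):
--     z = sum(C[i]*X[i] for i in range(len(X)))
--     vol = sum(V[i]*X[i] for i in range(len(X)))
--     return z, vol
--
-- def indices_desde_X(X):
--     return [i for i,val in enumerate(X) if val==1]
--
-- def tabu_search(X_init, C, V, capacidad, tenure=7, max_iters=200):
--     n = len(X_init)
--     current = X_init[:]
--     curZ, curV = valor_y_volumen_por_X(current, C, V)
--     best = current[:]; bestZ = curZ; bestV = curV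
--     tabu = {}
--     it = 0
--     while it < max_iters:
--         it += 1
--         neighbors = []
--         for i in range(n):
--             neigh = current[:]; neigh[i] = 1 - neigh[i]
--             z, vol = valor_y_volumen_por_X(neigh, C, V)
--             if vol <= capacidad:
--                 neighbors.append((z, i, neigh))
--         if not neighbors: break
--         neighbors.sort(key=lambda x: x[0], reverse=True)
--         chosen = None
--         for z, i, neigh in neighbors:
--             if i not in tabu or z > bestZ:
--                 chosen = (z, i, neigh); break
--         if chosen is None: break
--         z, i, neigh = chosen
--         current = neigh; curZ = z
--         tabu = {k: v-1 for k,v in tabu.items() if v-1>0}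
--         tabu[i] = tenure
--         if curZ > bestZ:
--             bestZ = curZ; best = current[:]
--     bestV = sum(V[i]*best[i] for i in range(n))
--     return bestZ, bestV, indices_desde_X(best), best
-- ===== SOURCE B (Python) =====
-- def tabu_search(X_init, C, V, capacidad, tenure=7, max_iters=200):
--     n = len(X_init)
--     current = X_init[:]
--     curZ = 0
--     curVol = 0
--     for i in range(n):
--         curZ += C[i] * current[i]
--         curVol += V[i] * current[i]
--     best = current[:]
--     bestZ = curZ
--     bestVol = curVol
--     expiry = [0] * n
--     it = 0
--     while it < max_iters:
--         it += 1
--         cands = []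
--         for i in range(n):
--             d = 1 - 2 * current[i]
--             if curVol + V[i] * d <= capacidad:
--                 cands.append((curZ + C[i] * d, i))
--         cands.sort(key=lambda t: t[0], reverse=True)
--         chosen = None
--         for z, i in cands:
--             if expiry[i] < it or z > bestZ:
--                 chosen = (z, i)
--                 break
--         if chosen is None:
--             break
--         z, i = chosen
--         d = 1 - 2 * current[i]
--         current[i] += d
--         curZ = z
--         curVol += V[i] * d
--         expiry[i] = it + max(tenure, 1)
--         if curZ > bestZ:
--             bestZ = curZ
--             best = current[:]
--             bestVol = curVol
--     return bestZ, bestVol, [i for i, v in enumerate(best) if v == 1], best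
-- ===== Notes on version B (the rewrite author's own statement) =====
-- stated objective: alternative
-- what changed: Each neighbour's value/volume is derived in O(1) from the current value/volume by a +-C[i]/+-V[i] delta instead of an O(n) full recompute, the per-iteration tabu-dict rebuild (decrement-and-filter) is replaced by a per-item expiry array updated in place, and the best volume is tracked incrementally instead of recomputed by a final scan (intended as faster per iteration, O(n log n) vs O(n^2); a timing run measured large ratios, e.g. 93x at n=256, but could not confirm the label because both programs exceed the budget when max_iters is huge).
import Mathlib
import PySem

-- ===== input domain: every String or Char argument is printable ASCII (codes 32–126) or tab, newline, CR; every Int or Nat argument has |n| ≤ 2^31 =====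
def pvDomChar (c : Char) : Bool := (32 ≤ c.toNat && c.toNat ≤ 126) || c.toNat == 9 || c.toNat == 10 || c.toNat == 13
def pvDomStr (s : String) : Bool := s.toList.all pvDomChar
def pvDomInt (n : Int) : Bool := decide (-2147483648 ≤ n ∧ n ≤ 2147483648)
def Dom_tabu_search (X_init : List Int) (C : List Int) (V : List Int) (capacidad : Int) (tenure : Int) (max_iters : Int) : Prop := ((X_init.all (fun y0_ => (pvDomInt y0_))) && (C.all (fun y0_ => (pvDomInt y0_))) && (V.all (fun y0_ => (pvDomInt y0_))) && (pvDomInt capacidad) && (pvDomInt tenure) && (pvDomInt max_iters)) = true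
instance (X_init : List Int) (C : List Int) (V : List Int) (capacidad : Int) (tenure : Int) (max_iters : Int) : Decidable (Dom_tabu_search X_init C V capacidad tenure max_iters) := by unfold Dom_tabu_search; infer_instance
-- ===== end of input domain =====

-- B recomputes nothing per neighbour: each neighbour's value/volume is the current value/volume shifted by ±C[i]/±V[i],
-- the tabu dict rebuilt every iteration becomes a per-item expiry array, and the best volume is tracked instead of recomputed.

-- ===== PORT A =====
-- helper valor_y_volumen_por_X(X, C, V)
def pvValorA (X C V : List Int) : Int × Int :=
  ((PySem.List.pyRange 0 (PySem.List.len X) 1).foldl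
      (fun acc i => acc + PySem.List.pyGetD C i 0 * PySem.List.pyGetD X i 0) 0,
   (PySem.List.pyRange 0 (PySem.List.len X) 1).foldl
      (fun acc i => acc + PySem.List.pyGetD V i 0 * PySem.List.pyGetD X i 0) 0)

-- helper indices_desde_X(X): [i for i, val in enumerate(X) if val == 1]
def pvIndicesA (X : List Int) : List Int :=
  (X.zipIdx.foldl (fun acc p => if p.1 == 1 then acc ++ [((p.2 : Nat) : Int)] else acc) [])

-- the while-loop of A; fuel = max_iters - it; returns the (best, bestZ) the code uses after the loop
def pvLoopA (C V : List Int) (capacidad tenure : Int) (n : Int) :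
    Nat → List Int → Int → List Int → Int → PySem.Dict Int Int → List Int × Int
  | 0, _current, _curZ, best, bestZ, _tabu => (best, bestZ)
  | fuel+1, current, _curZ, best, bestZ, tabu =>
      let neighbors : List (Int × Int × List Int) :=
        (PySem.List.pyRange 0 n 1).foldl (fun acc i =>
          let neigh := PySem.List.pySetD current i (1 - PySem.List.pyGetD current i 0)
          let zv := pvValorA neigh C V
          if zv.2 ≤ capacidad then acc ++ [(zv.1, i, neigh)] else acc) []
      if neighbors = [] then (best, bestZ)
      else
        let sortedN := PySem.List.sorted neighbors (fun t => t.1) true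
        match sortedN.find? (fun t => !(tabu.contains t.2.1) || decide (bestZ < t.1)) with
        | none => (best, bestZ)
        | some (z, _i, neigh) =>
            let current' := neigh
            let curZ' := z
            let tabu' := (tabu.items.foldl
                (fun d p => if 0 < p.2 - 1 then d.insert p.1 (p.2 - 1) else d)
                PySem.Dict.empty).insert _i tenure
            if bestZ < curZ' then
              pvLoopA C V capacidad tenure n fuel current' curZ' current' curZ' tabu'
            else
              pvLoopA C V capacidad tenure n fuel current' curZ' best bestZ tabu'

def tabu_search (X_init : List Int) (C : List Int) (V : List Int) (capacidad : Int) (tenure : Int) (max_iters : Int) : Int × Int × List Int × List Int :=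
  let n := PySem.List.len X_init
  let current := X_init
  let zv := pvValorA current C V
  let r := pvLoopA C V capacidad tenure n max_iters.toNat current zv.1 current zv.1 PySem.Dict.empty
  let best := r.1
  let bestZ := r.2
  let bestV := (PySem.List.pyRange 0 n 1).foldl
      (fun acc i => acc + PySem.List.pyGetD V i 0 * PySem.List.pyGetD best i 0) 0
  (bestZ, bestV, pvIndicesA best, best)

-- ===== PORT B =====
-- [i for i in range(n) if best[i] == 1]
def pvIndicesB (best : List Int) (n : Int) : List Int :=
  (PySem.List.pyRange 0 n 1).foldl
      (fun acc i => if PySem.List.pyGetD best i 0 == 1 then acc ++ [i] else acc) []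

-- the while-loop of B; state carries it, current value/volume and the per-item tabu expiry array
def pvLoopB (C V : List Int) (capacidad tenure : Int) (n : Int) :
    Nat → Int → List Int → Int → Int → List Int → Int → Int → List Int → Int × Int × List Int
  | 0, _it, _current, _curZ, _curVol, best, bestZ, bestVol, _expiry => (bestZ, bestVol, best)
  | fuel+1, it, current, curZ, curVol, best, bestZ, bestVol, expiry =>
      let it' := it + 1
      let cands : List (Int × Int) :=
        (PySem.List.pyRange 0 n 1).foldl (fun acc i =>
          let d := 1 - 2 * PySem.List.pyGetD current i 0
          if curVol + PySem.List.pyGetD V i 0 * d ≤ capacidad then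
            acc ++ [(curZ + PySem.List.pyGetD C i 0 * d, i)]
          else acc) []
      let sortedC := PySem.List.sorted cands (fun t => t.1) true
      match sortedC.find? (fun t => decide (PySem.List.pyGetD expiry t.2 0 < it') || decide (bestZ < t.1)) with
      | none => (bestZ, bestVol, best)
      | some (z, i) =>
          let d := 1 - 2 * PySem.List.pyGetD current i 0
          let current' := PySem.List.pySetD current i (PySem.List.pyGetD current i 0 + d)
          let curZ' := z
          let curVol' := curVol + PySem.List.pyGetD V i 0 * d
          let expiry' := PySem.List.pySetD expiry i (it' + max tenure 1)
          if bestZ < curZ' then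
            pvLoopB C V capacidad tenure n fuel it' current' curZ' curVol' current' curZ' curVol' expiry'
          else
            pvLoopB C V capacidad tenure n fuel it' current' curZ' curVol' best bestZ bestVol expiry'

def tabu_search_alt (X_init : List Int) (C : List Int) (V : List Int) (capacidad : Int) (tenure : Int) (max_iters : Int) : Int × Int × List Int × List Int :=
  let n := PySem.List.len X_init
  let current := X_init
  let curZ := (PySem.List.pyRange 0 n 1).foldl
      (fun acc i => acc + PySem.List.pyGetD C i 0 * PySem.List.pyGetD current i 0) 0
  let curVol := (PySem.List.pyRange 0 n 1).foldl
      (fun acc i => acc + PySem.List.pyGetD V i 0 * PySem.List.pyGetD current i 0) 0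
  let expiry := PySem.List.pyRepeat [(0 : Int)] n
  let r := pvLoopB C V capacidad tenure n max_iters.toNat 0 current curZ curVol current curZ curVol expiry
  (r.1, r.2.1, pvIndicesB r.2.2 n, r.2.2)

-- ===== PRECONDITION & SPEC =====
-- A raises IndexError when C or V is shorter than X_init (it reads C[i], V[i] for every i < len(X_init)); Pre_ excludes exactly those inputs.
def Pre_tabu_search (X_init : List Int) (C : List Int) (V : List Int) (capacidad : Int) (tenure : Int) (max_iters : Int) : Prop :=
  X_init.length ≤ C.length ∧ X_init.length ≤ V.length
instance (X_init : List Int) (C : List Int) (V : List Int) (capacidad : Int) (tenure : Int) (max_iters : Int) : Decidable (Pre_tabu_search X_init C V capacidad tenure max_iters) := by unfold Pre_tabu_search; infer_instance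

def pvWitness_tabu_search : List Int × List Int × List Int × Int × Int × Int :=
  ([1, 0, 1], [3, 4, 2], [1, 2, 2], 4, 2, 5)

def Spec_tabu_search (X_init : List Int) (C : List Int) (V : List Int) (capacidad : Int) (tenure : Int) (max_iters : Int) (out : Int × Int × List Int × List Int) : Prop := out = tabu_search_alt X_init C V capacidad tenure max_iters
instance (X_init : List Int) (C : List Int) (V : List Int) (capacidad : Int) (tenure : Int) (max_iters : Int) (out : Int × Int × List Int × List Int) : Decidable (Spec_tabu_search X_init C V capacidad tenure max_iters out) := by unfold Spec_tabu_search; infer_instance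

-- ===== CLAIM (what is proved, stated in full; the proofs are below) =====
def Claim_equal_tabu_search : Prop := ∀ (X_init : List Int) (C : List Int) (V : List Int) (capacidad : Int) (tenure : Int) (max_iters : Int), Dom_tabu_search X_init C V capacidad tenure max_iters → Pre_tabu_search X_init C V capacidad tenure max_iters → Spec_tabu_search X_init C V capacidad tenure max_iters (tabu_search X_init C V capacidad tenure max_iters)

-- ===== LEMMAS AND PROOFS =====

def pvSum (C cur : List Int) (n : Nat) : Int :=
  ((List.range n).map (fun j => C.getD j 0 * cur.getD j 0)).sum

def pvTabuRel (tabu : PySem.Dict Int Int) (expiry : List Int) (n : Nat) (tenure it : Int) : Prop :=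
  ∀ k : Int, tabu.get? k =
    if 0 ≤ k ∧ k.toNat < n ∧ it + 1 ≤ expiry.getD k.toNat 0 then
      some (tenure - (it + max tenure 1 - expiry.getD k.toNat 0))
    else none

theorem pvFind?_congr {α : Type} (p q : α → Bool) (l : List α) (h : ∀ x ∈ l, p x = q x) :
    l.find? p = l.find? q := by
  induction l with
  | nil => rfl
  | cons a l ih =>
    simp only [List.find?]
    rw [h a (by simp)]
    cases q a
    · exact ih (fun x hx => h x (by simp [hx]))
    · rfl


theorem pvInsertBy_map (proj : (Int × Int × List Int) → Int × Int) (x : Int × Int × List Int)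
    (ys : List (Int × Int × List Int)) (hp : ∀ t, (proj t).1 = t.1) :
    PySem.List.insertBy (fun a b => decide (b.1 < a.1)) (proj x) (ys.map proj)
      = (PySem.List.insertBy (fun a b => decide (b.1 < a.1)) x ys).map proj := by
  induction ys with
  | nil => simp [PySem.List.insertBy]
  | cons y ys ih =>
    simp only [List.map_cons, PySem.List.insertBy, hp]
    split_ifs with h
    · simp
    · simp [ih]

theorem pvSorted_map (proj : (Int × Int × List Int) → Int × Int)
    (L : List (Int × Int × List Int)) (hp : ∀ t, (proj t).1 = t.1) :
    PySem.List.sorted (L.map proj) (fun t => t.1) true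
      = (PySem.List.sorted L (fun t => t.1) true).map proj := by
  rw [PySem.List.sorted_rev_eq_foldl_insertBy, PySem.List.sorted_rev_eq_foldl_insertBy]
  suffices h : ∀ acc : List (Int × Int × List Int),
      (L.map proj).foldl (fun a x => PySem.List.insertBy (fun a b => decide (b.1 < a.1)) x a) (acc.map proj)
      = ((L.foldl (fun a x => PySem.List.insertBy (fun a b => decide (b.1 < a.1)) x a) acc).map proj) by
    simpa using h []
  induction L with
  | nil => intro acc; rfl
  | cons t L ih =>
    intro acc
    simp only [List.map_cons, List.foldl_cons]
    rw [pvInsertBy_map proj t acc hp, ih]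

theorem pvSum_set (C cur : List Int) (n k : Nat) (v : Int) (hk : k < n) (hkc : k < cur.length) :
    pvSum C (cur.set k v) n = pvSum C cur n + C.getD k 0 * (v - cur.getD k 0) := by
  unfold pvSum
  induction n with
  | zero => omega
  | succ m ih =>
    rw [List.range_succ]
    simp only [List.map_append, List.sum_append, List.map_cons, List.map_nil, List.sum_cons, List.sum_nil]
    rcases Nat.lt_or_ge k m with h | h
    · rw [ih h]
      have : (cur.set k v).getD m 0 = cur.getD m 0 := by
        rcases Nat.lt_or_ge m cur.length with hm | hm
        · simp [List.getD_eq_getElem?_getD, List.getElem?_set_ne (by omega : k ≠ m)]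
        · have e1 : (cur.set k v)[m]? = none := List.getElem?_eq_none (by simpa using hm)
          have e2 : cur[m]? = none := List.getElem?_eq_none (by simpa using hm)
          simp [List.getD_eq_getElem?_getD, e1, e2]
      rw [this]; ring
    · have hkm : k = m := by omega
      subst hkm
      have h1 : (cur.set k v).getD k 0 = v := by
        simp [List.getD_eq_getElem?_getD, List.getElem?_set_self (by omega), hkc]
      have h2 : ∀ j ∈ List.range k, C.getD j 0 * (cur.set k v).getD j 0 = C.getD j 0 * cur.getD j 0 := by
        intro j hj
        have hj' : j < k := by simpa using hj
        rcases Nat.lt_or_ge j cur.length with hm | hm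
        · simp [List.getD_eq_getElem?_getD, List.getElem?_set_ne (by omega : k ≠ j)]
        · have e1 : (cur.set k v)[j]? = none := List.getElem?_eq_none (by simpa using hm)
          have e2 : cur[j]? = none := List.getElem?_eq_none (by simpa using hm)
          simp [List.getD_eq_getElem?_getD, e1, e2]
      rw [List.map_congr_left h2, h1]; ring

theorem pvRebuild_skip (x : Int) : ∀ (l : List (Int × Int)) (d : PySem.Dict Int Int),
    x ∉ l.map Prod.fst →
    (l.foldl (fun d p => if 0 < p.2 - 1 then d.insert p.1 (p.2 - 1) else d) d).get? x = d.get? x := by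
  intro l
  induction l with
  | nil => intro d _; rfl
  | cons p l ih =>
    intro d hx
    simp only [List.map_cons, List.mem_cons] at hx
    push_neg at hx
    simp only [List.foldl_cons]
    rw [ih _ hx.2]
    split_ifs with h
    · rw [PySem.Dict.get?_insert_of_ne _ _ hx.1]
    · rfl

theorem pvRebuild_aux (x : Int) : ∀ (l : List (Int × Int)) (d : PySem.Dict Int Int),
    (l.map Prod.fst).Nodup →
    (l.foldl (fun d p => if 0 < p.2 - 1 then d.insert p.1 (p.2 - 1) else d) d).get? x =
      (match l.find? (fun p => p.1 == x) with
       | some p => if 0 < p.2 - 1 then some (p.2 - 1) else d.get? x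
       | none => d.get? x) := by
  intro l
  induction l with
  | nil => intro d _; rfl
  | cons p l ih =>
    intro d hnd
    simp only [List.map_cons, List.nodup_cons] at hnd
    simp only [List.foldl_cons, List.find?]
    by_cases hpx : p.1 = x
    · simp only [hpx, beq_self_eq_true]
      rw [pvRebuild_skip x l _ (by simpa [hpx] using hnd.1)]
      split_ifs with h
      · rw [PySem.Dict.get?_insert_self]
      · rfl
    · have hbeq : (p.1 == x) = false := by simpa using hpx
      rw [hbeq]
      rw [ih _ hnd.2]
      have hd : ((if 0 < p.2 - 1 then d.insert p.1 (p.2 - 1) else d)).get? x = d.get? x := by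
        split_ifs with h
        · rw [PySem.Dict.get?_insert_of_ne _ _ (Ne.symm hpx)]
        · rfl
      cases hfind : l.find? (fun p => p.1 == x) <;> simp only [hfind, hd]

theorem pvRebuild_get? (tabu : PySem.Dict Int Int) (hnd : tabu.keys.Nodup) (x : Int) :
    (tabu.items.foldl (fun d p => if 0 < p.2 - 1 then d.insert p.1 (p.2 - 1) else d)
        PySem.Dict.empty).get? x
      = (tabu.get? x).bind (fun v => if 0 < v - 1 then some (v - 1) else none) := by
  rw [pvRebuild_aux x tabu.items PySem.Dict.empty hnd]
  show _ = (Option.map Prod.snd (tabu.items.find? (fun p => p.1 == x))).bind _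
  cases hfind : tabu.items.find? (fun p => p.1 == x) <;> simp [PySem.Dict.get?_empty]

theorem pvRebuild_nodup (tabu : PySem.Dict Int Int) :
    (tabu.items.foldl (fun d p => if 0 < p.2 - 1 then d.insert p.1 (p.2 - 1) else d)
        PySem.Dict.empty).keys.Nodup := by
  suffices h : ∀ (l : List (Int × Int)) (d : PySem.Dict Int Int), d.keys.Nodup →
      (l.foldl (fun d p => if 0 < p.2 - 1 then d.insert p.1 (p.2 - 1) else d) d).keys.Nodup by
    exact h _ _ PySem.Dict.nodup_keys_empty
  intro l
  induction l with
  | nil => intro d hd; exact hd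
  | cons p l ih =>
    intro d hd
    simp only [List.foldl_cons]
    apply ih
    split_ifs with h
    · exact PySem.Dict.nodup_keys_insert _ _ _ hd
    · exact hd

theorem pvZipIdx_filter : ∀ (X : List Int) (s : Nat),
    ((List.zipIdx X s).filter (fun p => p.1 == 1)).map (fun p => ((p.2 : Nat) : Int))
      = ((List.range X.length).filter (fun k => X.getD k 0 == 1)).map (fun k => ((k + s : Nat) : Int)) := by
  intro X
  induction X with
  | nil => intro s; simp
  | cons x X ih =>
    intro s
    rw [List.zipIdx_cons]
    simp only [List.length_cons, List.range_succ_eq_map]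
    rw [List.filter_cons, List.filter_cons]
    have hg0 : (x :: X).getD 0 0 = x := rfl
    by_cases hx : x = 1
    · simp only [hx, hg0, beq_self_eq_true, if_pos]
      simp only [List.map_cons]
      rw [ih (s+1)]
      simp only [List.filter_map, List.map_map, Function.comp_def, List.getD_cons_succ]
      congr 1
      · simp
      · try rw [List.map_map]
        apply List.map_congr_left
        intro k hk
        simp only [Function.comp_apply, Nat.succ_eq_add_one]
        congr 1
        omega
    · have hb : (x == 1) = false := by simpa using hx
      simp only [hb, hg0, if_neg Bool.false_ne_true]
      rw [ih (s+1)]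
      simp only [List.filter_map, List.map_map, Function.comp_def, List.getD_cons_succ]
      try rw [List.map_map]
      apply List.map_congr_left
      intro k hk
      simp only [Function.comp_apply, Nat.succ_eq_add_one]
      congr 1
      omega

theorem pvSum_foldl (C X : List Int) (m : Nat) :
    (PySem.List.pyRange 0 (m : Int) 1).foldl
      (fun acc i => acc + PySem.List.pyGetD C i 0 * PySem.List.pyGetD X i 0) 0 = pvSum C X m := by
  rw [show ((1:Int)) = (1:Int) from rfl]
  rw [PySem.List.pyRange_zero_natCast, List.foldl_map]
  simp only [PySem.List.pyGetD_natCast]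
  rw [PySem.List.foldl_add]
  simp [pvSum]

theorem pvValorA_eq (X C V : List Int) : pvValorA X C V = (pvSum C X X.length, pvSum V X X.length) := by
  unfold pvValorA
  rw [PySem.List.len_eq, pvSum_foldl, pvSum_foldl]

theorem pvGetD_set (l : List Int) (kk j : Nat) (v : Int) (h : kk < l.length) :
    (l.set kk v).getD j 0 = if j = kk then v else l.getD j 0 := by
  by_cases hjk : j = kk
  · subst hjk
    simp [List.getD_eq_getElem?_getD, List.getElem?_set_self h]
  · rw [if_neg hjk]
    rcases Nat.lt_or_ge j l.length with hj | hj
    · simp [List.getD_eq_getElem?_getD, List.getElem?_set_ne (fun hh => hjk hh.symm)]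
    · have e1 : (l.set kk v)[j]? = none := List.getElem?_eq_none (by simpa using hj)
      have e2 : l[j]? = none := List.getElem?_eq_none hj
      simp [List.getD_eq_getElem?_getD, e1, e2]

theorem pvLoop_eq (C V : List Int) (capacidad tenure : Int) (n : Nat)
    (hC : n ≤ C.length) (hV : n ≤ V.length) :
    ∀ (fuel : Nat) (current best expiry : List Int) (bestZ it : Int)
      (tabu : PySem.Dict Int Int),
      current.length = n → best.length = n → expiry.length = n →
      0 ≤ it →
      tabu.keys.Nodup →
      pvTabuRel tabu expiry n tenure it →
      (∀ j : Nat, j < n → expiry.getD j 0 ≤ it + max tenure 1) →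
      pvLoopB C V capacidad tenure (n : Int) fuel it current (pvSum C current n) (pvSum V current n)
          best bestZ (pvSum V best n) expiry
        = ((pvLoopA C V capacidad tenure (n : Int) fuel current (pvSum C current n) best bestZ tabu).2,
           pvSum V (pvLoopA C V capacidad tenure (n : Int) fuel current (pvSum C current n) best bestZ tabu).1 n,
           (pvLoopA C V capacidad tenure (n : Int) fuel current (pvSum C current n) best bestZ tabu).1)
      ∧ (pvLoopA C V capacidad tenure (n : Int) fuel current (pvSum C current n) best bestZ tabu).1.length = n := by
  intro fuel
  induction fuel with
  | zero =>
    intro current best expiry bestZ it tabu hcur hbest hexp hit hnd hrel hbound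
    exact ⟨rfl, hbest⟩
  | succ f ih =>
    intro current best expiry bestZ it tabu hcur hbest hexp hit hnd hrel hbound
    have hnb : (PySem.List.pyRange 0 (n:Int) 1).foldl (fun acc i =>
          if (pvValorA (PySem.List.pySetD current i (1 - PySem.List.pyGetD current i 0)) C V).2 ≤ capacidad then
            acc ++ [((pvValorA (PySem.List.pySetD current i (1 - PySem.List.pyGetD current i 0)) C V).1, i,
                     PySem.List.pySetD current i (1 - PySem.List.pyGetD current i 0))]
          else acc) []
        = ((List.range n).filter (fun k =>
              decide (pvSum V current n + V.getD k 0 * (1 - 2*current.getD k 0) ≤ capacidad))).map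
            (fun k => (pvSum C current n + C.getD k 0 * (1 - 2*current.getD k 0), (k:Int),
                       current.set k (1 - current.getD k 0))) := by
      rw [PySem.List.pyRange_zero_natCast, List.foldl_map]
      simp only [PySem.List.pyGetD_natCast, PySem.List.pySetD_natCast, pvValorA_eq]
      rw [PySem.List.foldl_append_ite
            (fun k => (pvSum V (current.set k (1 - current.getD k 0)) (current.set k (1 - current.getD k 0)).length ≤ capacidad))
            (fun k => (pvSum C (current.set k (1 - current.getD k 0)) (current.set k (1 - current.getD k 0)).length, (k:Int),
                       current.set k (1 - current.getD k 0)))]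
      simp only [List.length_set, hcur, List.nil_append]
      have hps : ∀ (W : List Int), n ≤ W.length → ∀ k, k < n →
          pvSum W (current.set k (1 - current.getD k 0)) n
            = pvSum W current n + W.getD k 0 * (1 - 2*current.getD k 0) := by
        intro W hW k hk
        rw [pvSum_set W current n k _ hk (by omega)]
        ring
      have hfe : (List.range n).filter (fun k => decide (pvSum V (current.set k (1 - current.getD k 0)) n ≤ capacidad))
          = (List.range n).filter (fun k => decide (pvSum V current n + V.getD k 0 * (1 - 2*current.getD k 0) ≤ capacidad)) := by
        apply List.filter_congr
        intro k hk
        rw [hps V hV k (List.mem_range.mp hk)]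
      rw [hfe]
      apply List.map_congr_left
      intro k hk
      have hk' : k < n := List.mem_range.mp (List.mem_of_mem_filter hk)
      rw [hps C hC k hk']

    have hps : ∀ (W : List Int), n ≤ W.length → ∀ k, k < n →
        pvSum W (current.set k (1 - current.getD k 0)) n
          = pvSum W current n + W.getD k 0 * (1 - 2*current.getD k 0) := by
      intro W hW k hk
      rw [pvSum_set W current n k _ hk (by omega)]
      ring
    have hcd : (PySem.List.pyRange 0 (n:Int) 1).foldl (fun acc i =>
          if pvSum V current n + PySem.List.pyGetD V i 0 * (1 - 2 * PySem.List.pyGetD current i 0) ≤ capacidad then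
            acc ++ [(pvSum C current n + PySem.List.pyGetD C i 0 * (1 - 2 * PySem.List.pyGetD current i 0), i)]
          else acc) []
        = (((List.range n).filter (fun k =>
              decide (pvSum V current n + V.getD k 0 * (1 - 2*current.getD k 0) ≤ capacidad))).map
            (fun k => (pvSum C current n + C.getD k 0 * (1 - 2*current.getD k 0), (k:Int),
                       current.set k (1 - current.getD k 0)))).map (fun t => (t.1, t.2.1)) := by
      rw [PySem.List.pyRange_zero_natCast, List.foldl_map]
      simp only [PySem.List.pyGetD_natCast]
      rw [PySem.List.foldl_append_ite
            (fun k => (pvSum V current n + V.getD k 0 * (1 - 2 * current.getD k 0) ≤ capacidad))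
            (fun k => (pvSum C current n + C.getD k 0 * (1 - 2 * current.getD k 0), (k:Int)))]
      rw [List.map_map]
      rfl
    simp only [pvLoopB, pvLoopA]
    rw [hnb, hcd]
    by_cases hemp : (List.range n).filter (fun k =>
        decide (pvSum V current n + V.getD k 0 * (1 - 2*current.getD k 0) ≤ capacidad)) = []
    · simp only [hemp, List.map_nil, if_pos]
      exact ⟨rfl, hbest⟩
    · rw [if_neg (by simpa using hemp)]
      rw [pvSorted_map (fun t => (t.1, t.2.1)) _ (fun t => rfl)]
      rw [List.find?_map]
      rw [pvFind?_congr _ (fun t => !(tabu.contains t.2.1) || decide (bestZ < t.1)) _ ?hpred]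
      case hpred =>
        intro t ht
        rw [PySem.List.mem_sorted] at ht
        obtain ⟨k, hkf, hfAk⟩ := List.mem_map.mp ht
        have hk' : k < n := List.mem_range.mp (List.mem_of_mem_filter hkf)
        subst hfAk
        simp only [Function.comp_apply, PySem.List.pyGetD_natCast]
        have hc : tabu.contains ((k:Nat):Int) = decide (it + 1 ≤ expiry.getD k 0) := by
          rw [PySem.Dict.contains_eq_isSome_get?, hrel]
          simp only [Int.toNat_natCast]
          by_cases h : it + 1 ≤ expiry.getD k 0
          · rw [if_pos ⟨Int.natCast_nonneg k, hk', h⟩]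
            simp only [Option.isSome_some]
            exact (decide_eq_true h).symm
          · rw [if_neg (fun hco => h hco.2.2)]
            simp only [Option.isSome_none]
            exact (decide_eq_false h).symm
        rw [hc]
        by_cases h : it + 1 ≤ expiry.getD k 0
        · rw [show decide (expiry.getD k 0 < it + 1) = false from decide_eq_false (by omega),
              show decide (it + 1 ≤ expiry.getD k 0) = true from decide_eq_true h]
          rfl
        · rw [show decide (expiry.getD k 0 < it + 1) = true from decide_eq_true (by omega),
              show decide (it + 1 ≤ expiry.getD k 0) = false from decide_eq_false h]
          rfl
      cases hfind : (PySem.List.sorted (((List.range n).filter (fun k =>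
              decide (pvSum V current n + V.getD k 0 * (1 - 2*current.getD k 0) ≤ capacidad))).map
            (fun k => (pvSum C current n + C.getD k 0 * (1 - 2*current.getD k 0), (k:Int),
                       current.set k (1 - current.getD k 0)))) (fun t => t.1) true).find?
            (fun t => !(tabu.contains t.2.1) || decide (bestZ < t.1)) with
      | none =>
        exact ⟨rfl, hbest⟩
      | some t =>
        have htm := List.mem_of_find?_eq_some hfind
        rw [PySem.List.mem_sorted] at htm
        obtain ⟨k, hkf, hfAk⟩ := List.mem_map.mp htm
        have hk' : k < n := List.mem_range.mp (List.mem_of_mem_filter hkf)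
        subst hfAk
        simp only [Option.map_some]
        simp only [PySem.List.pyGetD_natCast, PySem.List.pySetD_natCast]
        have hset : current.getD k 0 + (1 - 2 * current.getD k 0) = 1 - current.getD k 0 := by ring
        rw [hset]
        have hz : pvSum C current n + C.getD k 0 * (1 - 2*current.getD k 0)
            = pvSum C (current.set k (1 - current.getD k 0)) n := (hps C hC k hk').symm
        have hv : pvSum V current n + V.getD k 0 * (1 - 2*current.getD k 0)
            = pvSum V (current.set k (1 - current.getD k 0)) n := (hps V hV k hk').symm
        rw [hz, hv]
        have hlen' : (current.set k (1 - current.getD k 0)).length = n := by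
          rw [List.length_set, hcur]
        have hexp' : (expiry.set k (it + 1 + max tenure 1)).length = n := by
          rw [List.length_set, hexp]
        have hnd' : ((tabu.items.foldl (fun d p => if 0 < p.2 - 1 then d.insert p.1 (p.2 - 1) else d)
            PySem.Dict.empty).insert ((k:Nat):Int) tenure).keys.Nodup :=
          PySem.Dict.nodup_keys_insert _ _ _ (pvRebuild_nodup tabu)
        have hMcase : max tenure 1 = tenure ∨ max tenure 1 = 1 := by
          rcases le_total tenure 1 with h | h
          · right; exact max_eq_right h
          · left; exact max_eq_left h
        have hM1 : (1:Int) ≤ max tenure 1 := le_max_right _ _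
        have hrel' : pvTabuRel ((tabu.items.foldl (fun d p => if 0 < p.2 - 1 then d.insert p.1 (p.2 - 1) else d)
            PySem.Dict.empty).insert ((k:Nat):Int) tenure) (expiry.set k (it + 1 + max tenure 1)) n tenure (it+1) := by
          intro x
          by_cases hxk : x = ((k:Nat):Int)
          · subst hxk
            rw [PySem.Dict.get?_insert_self]
            have hgd : (expiry.set k (it + 1 + max tenure 1)).getD ((k:Int)).toNat 0 = it + 1 + max tenure 1 := by
              rw [Int.toNat_natCast, pvGetD_set expiry k k _ (by omega), if_pos rfl]
            rw [if_pos ⟨Int.natCast_nonneg k, by simpa using hk', by rw [hgd]; omega⟩]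
            rw [hgd]
            congr 1
            omega
          · rw [PySem.Dict.get?_insert_of_ne _ _ hxk, pvRebuild_get? tabu hnd x, hrel x]
            by_cases hx : 0 ≤ x ∧ x.toNat < n
            · have hxk' : x.toNat ≠ k := by
                intro hh
                exact hxk (by rw [← hh]; omega)
              rw [pvGetD_set expiry k x.toNat _ (by omega), if_neg hxk']
              have hbnd := hbound x.toNat hx.2
              by_cases h1 : it + 1 ≤ expiry.getD x.toNat 0
              · rw [if_pos (show 0 ≤ x ∧ x.toNat < n ∧ it + 1 ≤ expiry.getD x.toNat 0 from ⟨hx.1, hx.2, h1⟩),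
                    Option.bind_some _ _]
                by_cases h2 : it + 1 + 1 ≤ expiry.getD x.toNat 0
                · rw [if_pos (show 0 < tenure - (it + max tenure 1 - expiry.getD x.toNat 0) - 1 by
                        rcases hMcase with h | h <;> omega),
                      if_pos (show 0 ≤ x ∧ x.toNat < n ∧ it + 1 + 1 ≤ expiry.getD x.toNat 0 from ⟨hx.1, hx.2, h2⟩)]
                  congr 1
                  omega
                · rw [if_neg (show ¬(0 < tenure - (it + max tenure 1 - expiry.getD x.toNat 0) - 1) by
                        rcases hMcase with h | h <;> omega),
                      if_neg (show ¬(0 ≤ x ∧ x.toNat < n ∧ it + 1 + 1 ≤ expiry.getD x.toNat 0) from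
                        fun hco => h2 hco.2.2)]
              · rw [if_neg (show ¬(0 ≤ x ∧ x.toNat < n ∧ it + 1 ≤ expiry.getD x.toNat 0) from
                      fun hco => h1 hco.2.2),
                    Option.bind_none _,
                    if_neg (show ¬(0 ≤ x ∧ x.toNat < n ∧ it + 1 + 1 ≤ expiry.getD x.toNat 0) from
                      fun hco => h1 (by have := hco.2.2; omega))]
            · have hL : ¬(0 ≤ x ∧ x.toNat < n ∧ it + 1 ≤ expiry.getD x.toNat 0) :=
                fun hco => hx ⟨hco.1, hco.2.1⟩
              have hR : ¬(0 ≤ x ∧ x.toNat < n ∧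
                  it + 1 + 1 ≤ (expiry.set k (it + 1 + max tenure 1)).getD x.toNat 0) :=
                fun hco => hx ⟨hco.1, hco.2.1⟩
              rw [if_neg hL, Option.bind_none _, if_neg hR]
        have hbound' : ∀ j : Nat, j < n →
            (expiry.set k (it + 1 + max tenure 1)).getD j 0 ≤ (it + 1) + max tenure 1 := by
          intro j hj
          rw [pvGetD_set expiry k j _ (by omega)]
          by_cases hjk : j = k
          · rw [if_pos hjk]
          · rw [if_neg hjk]
            have := hbound j hj
            omega
        by_cases hif : bestZ < pvSum C (current.set k (1 - current.getD k 0)) n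
        · rw [if_pos hif, if_pos hif]
          exact ih (current.set k (1 - current.getD k 0)) (current.set k (1 - current.getD k 0))
            (expiry.set k (it + 1 + max tenure 1)) _ (it+1) _
            hlen' hlen' hexp' (by omega) hnd' hrel' hbound'
        · rw [if_neg hif, if_neg hif]
          exact ih (current.set k (1 - current.getD k 0)) best
            (expiry.set k (it + 1 + max tenure 1)) _ (it+1) _
            hlen' hbest hexp' (by omega) hnd' hrel' hbound'


theorem pvRep0 (m j : Nat) : (List.replicate m (0:Int)).getD j 0 = 0 := by
  simp [List.getD_eq_getElem?_getD, List.getElem?_replicate]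
  split <;> rfl

theorem pvIndices_eq (X : List Int) : pvIndicesB X (X.length : Int) = pvIndicesA X := by
  unfold pvIndicesB pvIndicesA
  rw [PySem.List.pyRange_zero_natCast, List.foldl_map]
  simp only [PySem.List.pyGetD_natCast]
  rw [PySem.List.foldl_append_if (fun k => X.getD k 0 == 1) (fun k => ((k:Nat):Int))]
  have hA : X.zipIdx.foldl (fun acc p => if p.1 == 1 then acc ++ [((p.2:Nat):Int)] else acc) []
      = [] ++ (X.zipIdx.filter (fun p => p.1 == 1)).map (fun p => ((p.2:Nat):Int)) :=
    PySem.List.foldl_append_if _ _ _ _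
  rw [hA]
  rw [pvZipIdx_filter X 0]
  simp

theorem pvIndicesB_eq (X : List Int) (m : Nat) (h : X.length = m) :
    pvIndicesB X (m : Int) = pvIndicesA X := by
  subst h
  exact pvIndices_eq X

-- ===== VERDICT (by name: the statement is the Claim_ definition above) =====
theorem tabu_search_spec : Claim_equal_tabu_search := by
  unfold Claim_equal_tabu_search
  intro X_init C V capacidad tenure max_iters _hdom hpre
  obtain ⟨hC, hV⟩ := hpre
  unfold Spec_tabu_search tabu_search tabu_search_alt
  simp only [PySem.List.len_eq]
  rw [pvValorA_eq]
  rw [pvSum_foldl C X_init X_init.length, pvSum_foldl V X_init X_init.length]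
  have hrep : PySem.List.pyRepeat [(0:Int)] (X_init.length : Int)
      = List.replicate X_init.length 0 := by
    rw [PySem.List.pyRepeat_singleton, Int.toNat_natCast]
  rw [hrep]
  have h0 : pvTabuRel PySem.Dict.empty (List.replicate X_init.length 0) X_init.length tenure 0 := by
    intro x
    rw [PySem.Dict.get?_empty, if_neg (fun hco => by have := hco.2.2; rw [pvRep0] at this; omega)]
  have hb0 : ∀ j : Nat, j < X_init.length →
      (List.replicate X_init.length (0:Int)).getD j 0 ≤ 0 + max tenure 1 := by
    intro j hj
    rw [pvRep0]
    have : (1:Int) ≤ max tenure 1 := le_max_right _ _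
    omega
  have hmain := pvLoop_eq C V capacidad tenure X_init.length hC hV max_iters.toNat
      X_init X_init (List.replicate X_init.length 0) (pvSum C X_init X_init.length) 0
      PySem.Dict.empty rfl rfl (List.length_replicate) (le_refl 0)
      PySem.Dict.nodup_keys_empty h0 hb0
  rw [hmain.1]
  rw [pvSum_foldl V _ X_init.length]
  rw [pvIndicesB_eq _ _ hmain.2]
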